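-- pv_equiv track=rewrite | github.com/soban23/campus-iq | ingestion/chunking.py | getHeaderLevel
-- ===== SOURCE A (Python) =====
-- def getHeaderLevel(line):
--     stripped = line.strip()
--     isHeader = stripped.startswith("#")
--     if not isHeader:
--         return 0
--     level = 0
--     index = 0
--     length = len(stripped)
--     while index < length and stripped[index] == "#":
--         level = level + 1
--         index = index + 1
--     hasSpace = index < length and stripped[index] == " "
--     if not hasSpace:
--         return 0
--     if level > 6:
--         return 0
--     return level
-- ===== SOURCE B (Python) =====
-- def getHeaderLevel(line):
--     stripped = line.strip()
--     for level in range(1, 7):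
--         if stripped.startswith("#" * level + " "):
--             return level
--     return 0
-- ===== Notes on version B (the rewrite author's own statement) =====
-- stated objective: idiomatic
-- what changed: B replaces A's counting while-loop plus separate space and level>6 checks by a bounded search: for each candidate level from 1 to 6 it tests whether the stripped line starts with that many hash characters followed by a space, returning the first level that matches, else 0.
import Mathlib
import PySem

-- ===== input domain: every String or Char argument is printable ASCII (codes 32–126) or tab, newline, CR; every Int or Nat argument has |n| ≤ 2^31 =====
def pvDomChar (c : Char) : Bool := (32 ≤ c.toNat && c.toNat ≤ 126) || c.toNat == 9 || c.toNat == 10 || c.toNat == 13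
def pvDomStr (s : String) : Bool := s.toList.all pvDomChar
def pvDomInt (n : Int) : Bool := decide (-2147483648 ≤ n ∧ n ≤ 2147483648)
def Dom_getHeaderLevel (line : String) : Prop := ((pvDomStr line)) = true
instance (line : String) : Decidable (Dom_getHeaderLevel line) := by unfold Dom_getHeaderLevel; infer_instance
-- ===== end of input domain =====

-- B replaces A's counting while-loop by six candidate prefix tests ("#"*l + " " for l = 1..6): idiomatic, same cost.

-- ===== PORT A =====
-- A's while loop (index scan over stripped counting leading '#') as the obvious structural recursion
def pvHashCount (cs : List Char) (level : Int) : Int × List Char :=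
  match cs with
  | [] => (level, [])
  | c :: rest => if c == '#' then pvHashCount rest (level + 1) else (level, c :: rest)

def getHeaderLevel (line : String) : Int :=
  let stripped := PySem.Str.strip line
  let isHeader := PySem.Str.startswith stripped "#"
  if !isHeader then 0
  else
    let p := pvHashCount stripped.toList 0
    let hasSpace := match p.2 with
      | c :: _ => c == ' '
      | [] => false
    if !hasSpace then 0
    else if p.1 > 6 then 0
    else p.1

-- ===== PORT B =====
-- the for-loop over range(1, 7) with early return
def pvLevelOf (stripped : String) : List Int → Int
  | [] => 0
  | l :: rest =>
      if PySem.Str.startswith stripped (String.ofList (List.replicate l.toNat '#') ++ " ")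
      then l
      else pvLevelOf stripped rest

def getHeaderLevel_alt (line : String) : Int :=
  let stripped := PySem.Str.strip line
  pvLevelOf stripped (PySem.List.pyRange 1 7 1)

-- ===== PRECONDITION & SPEC =====
def Spec_getHeaderLevel (line : String) (out : Int) : Prop := out = getHeaderLevel_alt line
instance (line : String) (out : Int) : Decidable (Spec_getHeaderLevel line out) := by unfold Spec_getHeaderLevel; infer_instance

-- ===== CLAIM (what is proved, stated in full; the proofs are below) =====
def Claim_equal_getHeaderLevel : Prop := ∀ (line : String), Dom_getHeaderLevel line → Spec_getHeaderLevel line (getHeaderLevel line)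

-- ===== LEMMAS AND PROOFS =====

theorem pvHashCount_spec (cs : List Char) (acc : Int) :
    pvHashCount cs acc =
      (acc + ((cs.takeWhile (· == '#')).length : Int), cs.dropWhile (· == '#')) := by
  induction cs generalizing acc with
  | nil => simp [pvHashCount]
  | cons c rest ih =>
    by_cases h : c == '#'
    · simp [pvHashCount, h, ih]
      ring
    · simp [pvHashCount, h]

theorem pvPrefix_iff (l k : Nat) (rest : List Char) (hr : rest.head? ≠ some '#') :
    ((List.replicate l '#' ++ [' ']) <+: (List.replicate k '#' ++ rest)) ↔
      (l = k ∧ rest.head? = some ' ') := by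
  induction l generalizing k with
  | zero =>
    cases k with
    | zero =>
      cases rest with
      | nil => simp
      | cons c rs =>
        simp only [List.replicate_zero, List.nil_append]
        constructor
        · rintro ⟨u, hu⟩
          have hc : c = ' ' := by
            have := congrArg List.head? hu
            simpa using this.symm
          simp [hc]
        · rintro ⟨-, hc⟩
          have hc' : c = ' ' := by simpa using hc
          exact ⟨rs, by simp [hc']⟩
    | succ k' =>
      constructor
      · rintro ⟨u, hu⟩
        simp only [List.replicate_zero, List.nil_append, List.replicate_succ,
          List.singleton_append, List.cons_append, List.cons.injEq] at hu
        exact absurd hu.1 (by decide)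
      · rintro ⟨h, -⟩
        exact absurd h (by omega)
  | succ l' ih =>
    cases k with
    | zero =>
      constructor
      · rintro ⟨u, hu⟩
        simp only [List.replicate_succ, List.replicate_zero, List.nil_append,
          List.cons_append] at hu
        cases rest with
        | nil => simp at hu
        | cons c rs =>
          have hc : c = '#' := by
            have := congrArg List.head? hu
            simpa using this.symm
          exact absurd (by simp [hc]) hr
      · rintro ⟨h, -⟩
        exact absurd h (by omega)
    | succ k' =>
      simp only [List.replicate_succ, List.cons_append, List.cons_prefix_cons, true_and]
      rw [ih k']
      constructor
      · rintro ⟨h, hs⟩; exact ⟨by omega, hs⟩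
      · rintro ⟨h, hs⟩; exact ⟨by omega, hs⟩

theorem pvHead_dropWhile (cs : List Char) : (cs.dropWhile (· == '#')).head? ≠ some '#' := by
  induction cs with
  | nil => simp
  | cons c rest ih =>
    by_cases h : c == '#'
    · simpa [List.dropWhile_cons, h] using ih
    · rw [List.dropWhile_cons, if_neg (by simpa using h)]
      simp only [List.head?_cons, ne_eq, Option.some.injEq]
      intro hc
      exact h (by simp [hc])

theorem pvCore (t : String) :
    (let stripped := t
     let isHeader := PySem.Str.startswith stripped "#"
     if !isHeader then (0:Int)
     else
       let p := pvHashCount stripped.toList 0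
       let hasSpace := match p.2 with
         | c :: _ => c == ' '
         | [] => false
       if !hasSpace then 0
       else if p.1 > 6 then 0
       else p.1) = pvLevelOf t (PySem.List.pyRange 1 7 1) := by
  have hrange : PySem.List.pyRange 1 7 1 = [1, 2, 3, 4, 5, 6] := by decide
  have hr := pvHead_dropWhile t.toList
  obtain ⟨rest, hrest⟩ : ∃ r, t.toList.dropWhile (· == '#') = r := ⟨_, rfl⟩
  obtain ⟨k, hk⟩ : ∃ n, (t.toList.takeWhile (· == '#')).length = n := ⟨_, rfl⟩
  rw [hrest] at hr
  have htake : t.toList.takeWhile (· == '#') = List.replicate k '#' := by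
    rw [List.eq_replicate_iff]
    exact ⟨hk, fun b hb => by simpa using List.mem_takeWhile_imp hb⟩
  have hsplit : List.replicate k '#' ++ rest = t.toList := by
    rw [← htake, ← hrest]; exact List.takeWhile_append_dropWhile
  have hstart : PySem.Str.startswith t "#" = true ↔ 0 < k := by
    rw [PySem.Str.startswith_eq, PySem.Chars.startswith_iff]
    show ('#'.toString.toList <+: t.toList) ↔ _
    constructor
    · rintro ⟨u, hu⟩
      by_contra h
      have hk0 : k = 0 := by omega
      rw [hk0, List.replicate_zero, List.nil_append] at hsplit
      apply hr
      rw [hsplit, ← hu]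
      rfl
    · intro h
      obtain ⟨k', rfl⟩ : ∃ k', k = k' + 1 := ⟨k - 1, by omega⟩
      refine ⟨List.replicate k' '#' ++ rest, ?_⟩
      rw [← hsplit]
      simp [List.replicate_succ, Char.toString]
  have hstartb : PySem.Str.startswith t "#" = decide (0 < k) := by
    by_cases h : 0 < k
    · rw [hstart.mpr h, decide_eq_true h]
    · rw [decide_eq_false h, Bool.eq_false_iff]
      intro hc
      exact h (hstart.mp hc)
  have hBcond : ∀ l : Nat,
      (PySem.Str.startswith t (String.ofList (List.replicate l '#') ++ " ") = true) ↔
        (l = k ∧ rest.head? = some ' ') := by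
    intro l
    rw [PySem.Str.startswith_eq, PySem.Chars.startswith_iff]
    have h2 : (String.ofList (List.replicate l '#') ++ " ").toList
        = List.replicate l '#' ++ [' '] := by simp
    rw [h2, ← hsplit]
    exact pvPrefix_iff l k rest hr
  have hBb : ∀ l : Nat,
      PySem.Str.startswith t (String.ofList (List.replicate l '#') ++ " ")
        = decide (l = k ∧ rest.head? = some ' ') := by
    intro l
    by_cases h : l = k ∧ rest.head? = some ' '
    · rw [(hBcond l).mpr h, decide_eq_true h]
    · rw [decide_eq_false h, Bool.eq_false_iff]
      intro hc
      exact h ((hBcond l).mp hc)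
  simp only [pvHashCount_spec, hrest, hk, hrange, pvLevelOf, hstartb, hBb]
  by_cases hsp : rest.head? = some ' '
  · cases rest with
    | nil => simp at hsp
    | cons c rs =>
      have hc : c = ' ' := by simpa using hsp
      subst hc
      simp only [hsp, and_true, Int.toNat_one]
      by_cases h1 : 0 < k
      · rcases Nat.lt_or_ge k 7 with hk7 | hk7
        · interval_cases k <;> simp <;> omega
        · have hgt : ((0:Int) + (k:Int) > 6) := by push_cast; omega
          simp only [h1, decide_true, Bool.not_true, Bool.false_eq_true, if_false,
            List.head?_cons, Option.some.injEq, BEq.rfl, Bool.not_true, if_pos hgt]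
          split_ifs with h2 h3 h4 h5 h6 h7 <;> simp_all <;> omega
      · have hk0 : k = 0 := by omega
        subst hk0
        simp
  · cases rest with
    | nil =>
      simp [hsp]
    | cons c rs =>
      have hc : ¬ (c == ' ') = true := by
        simp only [beq_iff_eq]
        intro h
        exact hsp (by simp [h])
      have hcne : c ≠ ' ' := by simpa using hc
      simp [hc, hcne]
-- ===== VERDICT (by name: the statement is the Claim_ definition above) =====
theorem getHeaderLevel_spec : Claim_equal_getHeaderLevel := by
  intro line _
  unfold Spec_getHeaderLevel getHeaderLevel getHeaderLevel_alt
  exact pvCore (PySem.Str.strip line)
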